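-- pv_equiv track=rewrite | github.com/mdhaarishussain/Project-Noor | bondhu-ai/api/routes/chat.py | _extract_conversation_context
-- ===== SOURCE A (Python) =====
-- from typing import Optional, List, Dict, Any
--
-- def _extract_conversation_context(
--     user_message: str,
--     ai_response: str,
--     personality_insights: Dict[str, Any]
-- ) -> list[str]:
--     """Extract conversation context keywords."""
--
--     # Simple keyword extraction
--     keywords = []
--
--     # Check for common themes
--     message_lower = user_message.lower()
--
--     if any(word in message_lower for word in ['stress', 'anxiety', 'worried', 'anxious']):
--         keywords.append("stress management")
--
--     if any(word in message_lower for word in ['goal', 'goals', 'achieve', 'accomplish']):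
--         keywords.append("goal setting")
--
--     if any(word in message_lower for word in ['relationship', 'friends', 'family', 'social']):
--         keywords.append("relationships")
--
--     if any(word in message_lower for word in ['work', 'job', 'career', 'workplace']):
--         keywords.append("work life")
--
--     if any(word in message_lower for word in ['sleep', 'tired', 'energy', 'rest']):
--         keywords.append("wellness")
--
--     # Add default contexts if none found
--     if not keywords:
--         keywords = ["mental wellness", "personal growth"]
--
--     return keywords[:5]  # Limit to 5 keywords
-- ===== SOURCE B (Python) =====
-- # Single data-driven pass: flat (keyword, theme) table + ordered dedup,
-- # replacing A's five hardcoded if-any branches.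
-- _THEME_PAIRS = [
--     ("stress", "stress management"), ("anxiety", "stress management"),
--     ("worried", "stress management"), ("anxious", "stress management"),
--     ("goal", "goal setting"), ("goals", "goal setting"),
--     ("achieve", "goal setting"), ("accomplish", "goal setting"),
--     ("relationship", "relationships"), ("friends", "relationships"),
--     ("family", "relationships"), ("social", "relationships"),
--     ("work", "work life"), ("job", "work life"),
--     ("career", "work life"), ("workplace", "work life"),
--     ("sleep", "wellness"), ("tired", "wellness"),
--     ("energy", "wellness"), ("rest", "wellness"),
-- ]
--
-- def _extract_conversation_context(user_message, ai_response, personality_insights):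
--     message_lower = user_message.lower()
--     themes = []
--     for kw, theme in _THEME_PAIRS:
--         if kw in message_lower and theme not in themes:
--             themes.append(theme)
--     if not themes:
--         themes = ["mental wellness", "personal growth"]
--     return themes[:5]
-- ===== Notes on version B (the rewrite author's own statement) =====
-- stated objective: simpler
-- what changed: Replaces five hardcoded if-any branches with a single fold over a flat (keyword, theme) table using order-preserving dedup of themes.
import Mathlib
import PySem

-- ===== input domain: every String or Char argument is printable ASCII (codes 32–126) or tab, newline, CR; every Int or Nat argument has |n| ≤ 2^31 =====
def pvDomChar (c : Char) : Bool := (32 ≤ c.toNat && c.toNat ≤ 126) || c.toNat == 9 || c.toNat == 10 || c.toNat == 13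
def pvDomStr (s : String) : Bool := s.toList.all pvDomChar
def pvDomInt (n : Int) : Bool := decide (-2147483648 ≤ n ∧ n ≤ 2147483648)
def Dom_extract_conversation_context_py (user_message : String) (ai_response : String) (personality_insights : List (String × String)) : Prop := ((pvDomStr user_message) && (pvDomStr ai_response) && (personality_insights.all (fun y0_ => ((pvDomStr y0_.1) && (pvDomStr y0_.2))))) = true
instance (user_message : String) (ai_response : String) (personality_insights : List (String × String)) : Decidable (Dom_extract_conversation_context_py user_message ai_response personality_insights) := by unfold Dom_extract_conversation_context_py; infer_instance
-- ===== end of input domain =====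

-- B replaces A's five hardcoded if-any branches with one fold over a flat
-- (keyword, theme) table with order-preserving dedup (objective: simpler).


-- ===== PORT A =====
def extract_conversation_context_py (user_message : String) (ai_response : String) (personality_insights : List (String × String)) : List String :=
  let keywords : List String := []
  let message_lower := PySem.Str.lower user_message
  let keywords := if ["stress", "anxiety", "worried", "anxious"].any
      (fun word => PySem.Str.isIn word message_lower) then keywords ++ ["stress management"] else keywords
  let keywords := if ["goal", "goals", "achieve", "accomplish"].any
      (fun word => PySem.Str.isIn word message_lower) then keywords ++ ["goal setting"] else keywords
  let keywords := if ["relationship", "friends", "family", "social"].any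
      (fun word => PySem.Str.isIn word message_lower) then keywords ++ ["relationships"] else keywords
  let keywords := if ["work", "job", "career", "workplace"].any
      (fun word => PySem.Str.isIn word message_lower) then keywords ++ ["work life"] else keywords
  let keywords := if ["sleep", "tired", "energy", "rest"].any
      (fun word => PySem.Str.isIn word message_lower) then keywords ++ ["wellness"] else keywords
  let keywords := if keywords.isEmpty then ["mental wellness", "personal growth"] else keywords
  PySem.List.slice keywords none (some 5)

-- ===== PORT B =====
-- flat (keyword, theme) table, B's `_THEME_PAIRS`
def eccPairs : List (String × String) :=
  [("stress", "stress management"), ("anxiety", "stress management"),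
   ("worried", "stress management"), ("anxious", "stress management"),
   ("goal", "goal setting"), ("goals", "goal setting"),
   ("achieve", "goal setting"), ("accomplish", "goal setting"),
   ("relationship", "relationships"), ("friends", "relationships"),
   ("family", "relationships"), ("social", "relationships"),
   ("work", "work life"), ("job", "work life"),
   ("career", "work life"), ("workplace", "work life"),
   ("sleep", "wellness"), ("tired", "wellness"),
   ("energy", "wellness"), ("rest", "wellness")]

-- B's loop body: append the theme if its keyword occurs and it is not yet collected
def eccStep (message_lower : String) (themes : List String) (p : String × String) : List String :=
  if PySem.Str.isIn p.1 message_lower && !(themes.contains p.2) then themes ++ [p.2] else themes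

def extract_conversation_context_py_alt (user_message : String) (ai_response : String) (personality_insights : List (String × String)) : List String :=
  let message_lower := PySem.Str.lower user_message
  let themes := eccPairs.foldl (eccStep message_lower) []
  let themes := if themes.isEmpty then ["mental wellness", "personal growth"] else themes
  PySem.List.slice themes none (some 5)

-- ===== PRECONDITION & SPEC =====
def Spec_extract_conversation_context_py (user_message : String) (ai_response : String) (personality_insights : List (String × String)) (out : List String) : Prop := out = extract_conversation_context_py_alt user_message ai_response personality_insights
instance (user_message : String) (ai_response : String) (personality_insights : List (String × String)) (out : List String) : Decidable (Spec_extract_conversation_context_py user_message ai_response personality_insights out) := by unfold Spec_extract_conversation_context_py; infer_instance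

-- ===== CLAIM (what is proved, stated in full; the proofs are below) =====
def Claim_equal_extract_conversation_context_py : Prop := ∀ (user_message : String) (ai_response : String) (personality_insights : List (String × String)), Dom_extract_conversation_context_py user_message ai_response personality_insights → Spec_extract_conversation_context_py user_message ai_response personality_insights (extract_conversation_context_py user_message ai_response personality_insights)

-- ===== LEMMAS AND PROOFS =====

-- over one 4-keyword group of the table, B's fold appends the theme iff any keyword occurs
lemma ecc_group (m k1 k2 k3 k4 t : String) (acc : List String) (h : acc.contains t = false) :
    [(k1, t), (k2, t), (k3, t), (k4, t)].foldl (eccStep m) acc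
      = if [k1, k2, k3, k4].any (fun word => PySem.Str.isIn word m) then acc ++ [t] else acc := by
  by_cases h1 : PySem.Str.isIn k1 m = true <;>
  by_cases h2 : PySem.Str.isIn k2 m = true <;>
  by_cases h3 : PySem.Str.isIn k3 m = true <;>
  by_cases h4 : PySem.Str.isIn k4 m = true <;>
  simp_all [eccStep, List.foldl]

lemma contains_ite_append (c : Prop) [Decidable c] (acc : List String) (x t : String)
    (h : acc.contains t = false) (hx : x ≠ t) :
    (if c then acc ++ [x] else acc).contains t = false := by
  split_ifs <;> simp_all [eq_comm]

-- B's fold over the whole table equals A's five-branch keyword construction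
lemma ecc_fold_eq (m : String) :
    eccPairs.foldl (eccStep m) []
      = (let k : List String := []
         let k := if ["stress", "anxiety", "worried", "anxious"].any (fun word => PySem.Str.isIn word m) then k ++ ["stress management"] else k
         let k := if ["goal", "goals", "achieve", "accomplish"].any (fun word => PySem.Str.isIn word m) then k ++ ["goal setting"] else k
         let k := if ["relationship", "friends", "family", "social"].any (fun word => PySem.Str.isIn word m) then k ++ ["relationships"] else k
         let k := if ["work", "job", "career", "workplace"].any (fun word => PySem.Str.isIn word m) then k ++ ["work life"] else k
         if ["sleep", "tired", "energy", "rest"].any (fun word => PySem.Str.isIn word m) then k ++ ["wellness"] else k) := by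
  rw [show eccPairs
      = [("stress", "stress management"), ("anxiety", "stress management"), ("worried", "stress management"), ("anxious", "stress management")]
        ++ ([("goal", "goal setting"), ("goals", "goal setting"), ("achieve", "goal setting"), ("accomplish", "goal setting")]
        ++ ([("relationship", "relationships"), ("friends", "relationships"), ("family", "relationships"), ("social", "relationships")]
        ++ ([("work", "work life"), ("job", "work life"), ("career", "work life"), ("workplace", "work life")]
        ++ [("sleep", "wellness"), ("tired", "wellness"), ("energy", "wellness"), ("rest", "wellness")]))) from rfl,
    List.foldl_append, List.foldl_append, List.foldl_append, List.foldl_append]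
  rw [ecc_group m "stress" "anxiety" "worried" "anxious" "stress management" [] rfl]
  set a1 : List String := if ["stress", "anxiety", "worried", "anxious"].any (fun word => PySem.Str.isIn word m) then [] ++ ["stress management"] else [] with ha1
  have c1 : ∀ t : String, t ≠ "stress management" → a1.contains t = false := by
    intro t ht; rw [ha1]; exact contains_ite_append _ _ _ _ rfl (fun e => ht e.symm)
  rw [ecc_group m "goal" "goals" "achieve" "accomplish" "goal setting" a1 (c1 _ (by decide))]
  set a2 : List String := if ["goal", "goals", "achieve", "accomplish"].any (fun word => PySem.Str.isIn word m) then a1 ++ ["goal setting"] else a1 with ha2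
  have c2 : ∀ t : String, t ≠ "stress management" → t ≠ "goal setting" → a2.contains t = false := by
    intro t ht1 ht2; rw [ha2]; exact contains_ite_append _ _ _ _ (c1 _ ht1) (fun e => ht2 e.symm)
  rw [ecc_group m "relationship" "friends" "family" "social" "relationships" a2 (c2 _ (by decide) (by decide))]
  set a3 : List String := if ["relationship", "friends", "family", "social"].any (fun word => PySem.Str.isIn word m) then a2 ++ ["relationships"] else a2 with ha3
  have c3 : ∀ t : String, t ≠ "stress management" → t ≠ "goal setting" → t ≠ "relationships" → a3.contains t = false := by
    intro t ht1 ht2 ht3; rw [ha3]; exact contains_ite_append _ _ _ _ (c2 _ ht1 ht2) (fun e => ht3 e.symm)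
  rw [ecc_group m "work" "job" "career" "workplace" "work life" a3 (c3 _ (by decide) (by decide) (by decide))]
  set a4 : List String := if ["work", "job", "career", "workplace"].any (fun word => PySem.Str.isIn word m) then a3 ++ ["work life"] else a3 with ha4
  have c4 : a4.contains "wellness" = false := by
    rw [ha4]; exact contains_ite_append _ _ _ _ (c3 _ (by decide) (by decide) (by decide)) (by decide)
  rw [ecc_group m "sleep" "tired" "energy" "rest" "wellness" a4 c4]

-- ===== VERDICT (by name: the statement is the Claim_ definition above) =====
theorem extract_conversation_context_py_spec : Claim_equal_extract_conversation_context_py := by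
  intro user_message ai_response personality_insights _
  unfold Spec_extract_conversation_context_py
  dsimp only [extract_conversation_context_py, extract_conversation_context_py_alt]
  rw [ecc_fold_eq]
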